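-- pv_equiv track=rewrite | github.com/Eagle57f/ECG1_Info | Corrections/DS Final 2024.py | notebonus
-- ===== SOURCE A (Python) =====
-- def note(cop,corr):
--     n=0
--     for i in range(len(cop)):
--         if corr[i]==cop[i]:
--             n+=1
--     return n
--
-- def notebonus(cop,corr):
--     n=0
--     for i in range(len(cop)):
--         if corr[i]==cop[i]:
--             n+=1 # Pareil que d'écrire n=n+1
--             if n==4:
--                 if note(cop,corr) + 2 <= 20:
--                     return note(cop,corr) + 2
--                 else:
--                     return 20
--         else:
--             n=0
--     return note(cop,corr)
-- ===== SOURCE B (Python) =====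
-- def notebonus(cop, corr):
--     total = 0
--     run = 0
--     has_run = False
--     for i in range(len(cop)):
--         if corr[i] == cop[i]:
--             total += 1
--             run += 1
--             if run == 4:
--                 has_run = True
--         else:
--             run = 0
--     if has_run:
--         return min(total + 2, 20)
--     return total
-- ===== Notes on version B (the rewrite author's own statement) =====
-- stated objective: simpler
-- what changed: Single pass with a running match counter, a consecutive-run counter and a has_run flag, replacing A's early-return-inside-the-loop plus two extra full rescans via note(); the bonus/cap is applied once after the loop.
import Mathlib
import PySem

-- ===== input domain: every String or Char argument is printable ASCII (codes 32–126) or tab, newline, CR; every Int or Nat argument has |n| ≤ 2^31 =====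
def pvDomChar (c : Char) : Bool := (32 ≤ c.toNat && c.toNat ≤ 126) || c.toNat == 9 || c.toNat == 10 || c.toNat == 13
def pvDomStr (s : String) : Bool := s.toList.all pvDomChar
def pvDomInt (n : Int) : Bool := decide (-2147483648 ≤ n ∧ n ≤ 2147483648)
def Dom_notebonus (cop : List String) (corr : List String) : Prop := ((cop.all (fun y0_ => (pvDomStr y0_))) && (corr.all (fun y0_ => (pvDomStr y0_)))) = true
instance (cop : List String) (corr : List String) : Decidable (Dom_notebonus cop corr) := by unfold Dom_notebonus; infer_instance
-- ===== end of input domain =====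

-- B is one fused pass (match count + run counter + flag, bonus applied after the loop),
-- replacing A's early return inside the loop and its two extra full note() rescans; objective: simpler.

-- ===== PORT A =====
-- helper note(cop, corr): full scan counting matches
def noteA (cop : List String) (corr : List String) : Int :=
  (PySem.List.pyRange 0 (cop.length : Int) 1).foldl
    (fun n i => if PySem.List.pyGet? corr i = PySem.List.pyGet? cop i then n + 1 else n) 0

-- the loop of notebonus, with its early return on n == 4
def notebonusLoop (cop : List String) (corr : List String) : List Int → Int → Int
  | [], _ => noteA cop corr
  | i :: rest, n =>
    if PySem.List.pyGet? corr i = PySem.List.pyGet? cop i then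
      if n + 1 = 4 then
        if noteA cop corr + 2 ≤ 20 then noteA cop corr + 2 else 20
      else notebonusLoop cop corr rest (n + 1)
    else notebonusLoop cop corr rest 0

def notebonus (cop : List String) (corr : List String) : Int :=
  notebonusLoop cop corr (PySem.List.pyRange 0 (cop.length : Int) 1) 0

-- ===== PORT B =====
-- single pass: (total, run, has_run)
def notebonus_alt (cop : List String) (corr : List String) : Int :=
  let s := (PySem.List.pyRange 0 (cop.length : Int) 1).foldl
    (fun (s : Int × Int × Bool) i =>
      if PySem.List.pyGet? corr i = PySem.List.pyGet? cop i then
        (s.1 + 1, s.2.1 + 1, s.2.2 || (s.2.1 + 1 = 4 : Bool))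
      else (s.1, 0, s.2.2))
    (0, 0, false)
  if s.2.2 then min (s.1 + 2) 20 else s.1

-- ===== PRECONDITION & SPEC =====
-- Pre_ excludes exactly the inputs where Python A raises IndexError (corr shorter than cop).
def Pre_notebonus (cop : List String) (corr : List String) : Prop := cop.length ≤ corr.length
instance (cop : List String) (corr : List String) : Decidable (Pre_notebonus cop corr) := by unfold Pre_notebonus; infer_instance
def pvWitness_notebonus : List String × List String := (["a", "b", "c"], ["a", "x", "c"])

def Spec_notebonus (cop : List String) (corr : List String) (out : Int) : Prop := out = notebonus_alt cop corr
instance (cop : List String) (corr : List String) (out : Int) : Decidable (Spec_notebonus cop corr out) := by unfold Spec_notebonus; infer_instance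

-- ===== CLAIM (what is proved, stated in full; the proofs are below) =====
def Claim_equal_notebonus : Prop := ∀ (cop : List String) (corr : List String), Dom_notebonus cop corr → Pre_notebonus cop corr → Spec_notebonus cop corr (notebonus cop corr)

-- ===== LEMMAS AND PROOFS =====

-- whether, starting from run counter n, some index in l completes a 4-run
def reach (cop : List String) (corr : List String) : List Int → Int → Bool
  | [], _ => false
  | i :: rest, n =>
    if PySem.List.pyGet? corr i = PySem.List.pyGet? cop i then
      (n + 1 = 4 : Bool) || reach cop corr rest (n + 1)
    else reach cop corr rest 0

-- A's loop returns the bonus value iff a 4-run is reached, else note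
theorem notebonusLoop_eq (cop corr : List String) (l : List Int) (n : Int) :
    notebonusLoop cop corr l n =
      if reach cop corr l n then
        (if noteA cop corr + 2 ≤ 20 then noteA cop corr + 2 else 20)
      else noteA cop corr := by
  induction l generalizing n with
  | nil => simp [notebonusLoop, reach]
  | cons i rest ih =>
    simp only [notebonusLoop, reach]
    by_cases h : PySem.List.pyGet? corr i = PySem.List.pyGet? cop i
    · by_cases h4 : n + 1 = 4
      · simp [h, h4]
      · simp [h, h4, ih]
    · simp [h, ih]

-- B's fold: the total accumulates the match count
theorem foldB_fst (cop corr : List String) (l : List Int) (t n : Int) (hr : Bool) :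
    (l.foldl
      (fun (s : Int × Int × Bool) i =>
        if PySem.List.pyGet? corr i = PySem.List.pyGet? cop i then
          (s.1 + 1, s.2.1 + 1, s.2.2 || (s.2.1 + 1 = 4 : Bool))
        else (s.1, 0, s.2.2))
      (t, n, hr)).1 =
      t + l.foldl (fun m i => if PySem.List.pyGet? corr i = PySem.List.pyGet? cop i then m + 1 else m) 0 := by
  induction l generalizing t n hr with
  | nil => simp
  | cons i rest ih =>
    simp only [List.foldl_cons]
    by_cases h : PySem.List.pyGet? corr i = PySem.List.pyGet? cop i
    · simp only [h, if_true]
      rw [ih]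
      simp only [PySem.List.foldl_ite_add_one]
      ring
    · simp only [if_neg h]
      rw [ih]

-- B's fold: the flag records whether a 4-run is reached
theorem foldB_hr (cop corr : List String) (l : List Int) (t n : Int) (hr : Bool) :
    (l.foldl
      (fun (s : Int × Int × Bool) i =>
        if PySem.List.pyGet? corr i = PySem.List.pyGet? cop i then
          (s.1 + 1, s.2.1 + 1, s.2.2 || (s.2.1 + 1 = 4 : Bool))
        else (s.1, 0, s.2.2))
      (t, n, hr)).2.2 = (hr || reach cop corr l n) := by
  induction l generalizing t n hr with
  | nil => simp [reach]
  | cons i rest ih =>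
    simp only [List.foldl_cons, reach]
    by_cases h : PySem.List.pyGet? corr i = PySem.List.pyGet? cop i
    · simp [h, ih, Bool.or_assoc]
    · simp [h, ih]

theorem notebonus_eq_alt (cop corr : List String) :
    notebonus cop corr = notebonus_alt cop corr := by
  unfold notebonus notebonus_alt
  rw [notebonusLoop_eq]
  simp only [foldB_fst, foldB_hr, Bool.false_or, noteA, zero_add]
  by_cases hr : reach cop corr (PySem.List.pyRange 0 (cop.length : Int) 1) 0
  · simp [hr, min_def]
  · simp [hr]

-- ===== VERDICT (by name: the statement is the Claim_ definition above) =====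
theorem notebonus_spec : Claim_equal_notebonus := by
  intro cop corr _ _
  exact notebonus_eq_alt cop corr
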